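-- pv_equiv track=rewrite | github.com/zafrem/pii-pattern-engine | verification/python/verification.py | ipv4_public
-- ===== SOURCE A (Python) =====
-- def ipv4_public(value: str) -> bool:
--     """
--     Verify IPv4 address is a public (routable) address.
--
--     Rejects:
--     - Private ranges: 10.0.0.0/8, 172.16.0.0/12, 192.168.0.0/16
--     - Loopback: 127.0.0.0/8
--     - Link-local: 169.254.0.0/16
--     - Documentation: 192.0.2.0/24, 198.51.100.0/24, 203.0.113.0/24
--     - Broadcast: 255.255.255.255
--     - Reserved: 0.0.0.0/8, 240.0.0.0/4
--
--     Args: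
--         value: IPv4 address string (e.g., "192.168.1.1")
--
--     Returns:
--         True if public IP, False if private/reserved
--     """
--     try:
--         parts = value.split(".")
--         if len(parts) != 4:
--             return False
--
--         octets = [int(p) for p in parts]
--
--         # Validate octets are in range
--         if not all(0 <= o <= 255 for o in octets):
--             return False
--
--         first, second, third, fourth = octets
--
--         # 0.0.0.0/8 - Current network
--         if first == 0:
--             return False
--
--         # 10.0.0.0/8 - Private
--         if first == 10:
--             return False
--
--         # 127.0.0.0/8 - Loopback
--         if first == 127:
--             return False
--
--         # 169.254.0.0/16 - Link-local
--         if first == 169 and second == 254: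
--             return False
--
--         # 172.16.0.0/12 - Private (172.16.0.0 - 172.31.255.255)
--         if first == 172 and 16 <= second <= 31:
--             return False
--
--         # 192.0.2.0/24 - Documentation (TEST-NET-1)
--         if first == 192 and second == 0 and third == 2:
--             return False
--
--         # 192.168.0.0/16 - Private
--         if first == 192 and second == 168:
--             return False
--
--         # 198.51.100.0/24 - Documentation (TEST-NET-2)
--         if first == 198 and second == 51 and third == 100:
--             return False
--
--         # 203.0.113.0/24 - Documentation (TEST-NET-3)
--         if first == 203 and second == 0 and third == 113:
--             return False
--
--         # 224.0.0.0/4 - Multicast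
--         if 224 <= first <= 239:
--             return False
--
--         # 240.0.0.0/4 - Reserved for future use
--         if first >= 240:
--             return False
--
--         return True
--
--     except (ValueError, AttributeError):
--         return False
-- ===== SOURCE B (Python) =====
-- _FORBIDDEN = [
--     (0, 16777215),            # 0.0.0.0/8
--     (167772160, 184549375),   # 10.0.0.0/8
--     (2130706432, 2147483647), # 127.0.0.0/8
--     (2851995648, 2852061183), # 169.254.0.0/16
--     (2886729728, 2887778303), # 172.16.0.0/12
--     (3221225984, 3221226239), # 192.0.2.0/24
--     (3232235520, 3232301055), # 192.168.0.0/16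
--     (3325256704, 3325256959), # 198.51.100.0/24
--     (3405803776, 3405804031), # 203.0.113.0/24
--     (3758096384, 4026531839), # 224.0.0.0/4
--     (4026531840, 4294967295), # 240.0.0.0/4
-- ]
--
-- def ipv4_public(value: str) -> bool:
--     try:
--         parts = value.split(".")
--         if len(parts) != 4:
--             return False
--         octets = [int(p) for p in parts]
--         if not all(0 <= o <= 255 for o in octets):
--             return False
--         ip = 0
--         for o in octets:
--             ip = ip * 256 + o
--         return not any(lo <= ip <= hi for lo, hi in _FORBIDDEN)
--     except (ValueError, AttributeError):
--         return False
-- ===== Notes on version B (the rewrite author's own statement) =====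
-- stated objective: simpler
-- what changed: Replaces A's eleven hard-coded octet branch tests by packing the four octets into a single 32-bit integer and scanning a literal table of forbidden (lo, hi) ranges.
import Mathlib
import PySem

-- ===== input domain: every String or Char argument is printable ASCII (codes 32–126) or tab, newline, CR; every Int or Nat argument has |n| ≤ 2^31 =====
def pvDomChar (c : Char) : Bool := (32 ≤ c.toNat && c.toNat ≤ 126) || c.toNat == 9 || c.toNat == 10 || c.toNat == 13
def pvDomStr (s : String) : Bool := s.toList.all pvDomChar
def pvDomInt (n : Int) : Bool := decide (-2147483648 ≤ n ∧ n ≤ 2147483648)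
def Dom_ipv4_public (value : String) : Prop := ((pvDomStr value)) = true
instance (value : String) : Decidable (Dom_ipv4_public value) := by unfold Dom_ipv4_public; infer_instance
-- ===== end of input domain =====

-- B replaces A's eleven hard-coded branch tests by packing the four octets into one
-- integer and scanning a literal table of forbidden (lo, hi) ranges (objective: simpler).

-- shared parsing prologue helper: [int(p) for p in parts]; none = first ValueError
def pvIntList : List (List Char) → Option (List Int)
  | [] => some []
  | p :: ps =>
    match PySem.Int.ofChars? p with
    | none => none
    | some n =>
      match pvIntList ps with
      | none => none
      | some ns => some (n :: ns)

-- ===== PORT A =====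
-- literal transliteration of A: split on '.', length check, int() comprehension,
-- octet range check, then the chain of branch tests in source order.
def ipv4_public (value : String) : Bool :=
  let parts := PySem.Chars.splitOn value.toList ['.']
  if parts.length ≠ 4 then false
  else
    match pvIntList parts with
    | none => false                       -- int(p) raised ValueError → except → False
    | some octets =>
      if !(octets.all fun o => 0 ≤ o && o ≤ 255) then false
      else
        match octets with
        | [first, second, third, _fourth] =>
          if first = 0 then false
          else if first = 10 then false
          else if first = 127 then false
          else if first = 169 ∧ second = 254 then false
          else if first = 172 ∧ 16 ≤ second ∧ second ≤ 31 then false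
          else if first = 192 ∧ second = 0 ∧ third = 2 then false
          else if first = 192 ∧ second = 168 then false
          else if first = 198 ∧ second = 51 ∧ third = 100 then false
          else if first = 203 ∧ second = 0 ∧ third = 113 then false
          else if 224 ≤ first ∧ first ≤ 239 then false
          else if 240 ≤ first then false
          else true
        | _ => false                      -- unreachable: len(parts) == 4

-- ===== PORT B =====
def pvForbidden : List (Int × Int) :=
  [(0, 16777215), (167772160, 184549375), (2130706432, 2147483647),
   (2851995648, 2852061183), (2886729728, 2887778303), (3221225984, 3221226239),
   (3232235520, 3232301055), (3325256704, 3325256959), (3405803776, 3405804031),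
   (3758096384, 4026531839), (4026531840, 4294967295)]

def ipv4_public_alt (value : String) : Bool :=
  let parts := PySem.Chars.splitOn value.toList ['.']
  if parts.length ≠ 4 then false
  else
    match pvIntList parts with
    | none => false
    | some octets =>
      if octets.all (fun o => 0 ≤ o && o ≤ 255) then
        let ip := octets.foldl (fun acc o => acc * 256 + o) 0
        !(pvForbidden.any fun r => r.1 ≤ ip && ip ≤ r.2)
      else false

-- ===== PRECONDITION & SPEC =====
def Spec_ipv4_public (value : String) (out : Bool) : Prop := out = ipv4_public_alt value
instance (value : String) (out : Bool) : Decidable (Spec_ipv4_public value out) := by unfold Spec_ipv4_public; infer_instance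

-- ===== CLAIM (what is proved, stated in full; the proofs are below) =====
def Claim_equal_ipv4_public : Prop := ∀ (value : String), Dom_ipv4_public value → Spec_ipv4_public value (ipv4_public value)

-- ===== LEMMAS AND PROOFS =====

theorem pvIntList_length : ∀ (ps : List (List Char)) (ns : List Int),
    pvIntList ps = some ns → ns.length = ps.length := by
  intro ps
  induction ps with
  | nil => intro ns h; simp only [pvIntList, Option.some.injEq] at h; simp [← h]
  | cons p ps ih =>
    intro ns h
    unfold pvIntList at h
    cases hx : PySem.Int.ofChars? p with
    | none => simp [hx] at h
    | some n =>
      simp only [hx] at h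
      cases hxs : pvIntList ps with
      | none => simp [hxs] at h
      | some ms =>
        simp only [hxs, Option.some.injEq] at h
        subst h
        simp [ih ms hxs]

-- per-range characterisations of packed-value membership (hypotheses: octet bounds)
theorem pvR1 (a b c d ip : Int) (hip : ip = ((a * 256 + b) * 256 + c) * 256 + d)
    (ha : 0 ≤ a ∧ a ≤ 255) (hb : 0 ≤ b ∧ b ≤ 255) (hc : 0 ≤ c ∧ c ≤ 255) (hd : 0 ≤ d ∧ d ≤ 255) :
    ((0:Int) ≤ ip ∧ ip ≤ 16777215) ↔ a = 0 := by omega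
theorem pvR2 (a b c d ip : Int) (hip : ip = ((a * 256 + b) * 256 + c) * 256 + d)
    (ha : 0 ≤ a ∧ a ≤ 255) (hb : 0 ≤ b ∧ b ≤ 255) (hc : 0 ≤ c ∧ c ≤ 255) (hd : 0 ≤ d ∧ d ≤ 255) :
    ((167772160:Int) ≤ ip ∧ ip ≤ 184549375) ↔ a = 10 := by omega
theorem pvR3 (a b c d ip : Int) (hip : ip = ((a * 256 + b) * 256 + c) * 256 + d)
    (ha : 0 ≤ a ∧ a ≤ 255) (hb : 0 ≤ b ∧ b ≤ 255) (hc : 0 ≤ c ∧ c ≤ 255) (hd : 0 ≤ d ∧ d ≤ 255) :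
    ((2130706432:Int) ≤ ip ∧ ip ≤ 2147483647) ↔ a = 127 := by omega
theorem pvR4 (a b c d ip : Int) (hip : ip = ((a * 256 + b) * 256 + c) * 256 + d)
    (ha : 0 ≤ a ∧ a ≤ 255) (hb : 0 ≤ b ∧ b ≤ 255) (hc : 0 ≤ c ∧ c ≤ 255) (hd : 0 ≤ d ∧ d ≤ 255) :
    ((2851995648:Int) ≤ ip ∧ ip ≤ 2852061183) ↔ (a = 169 ∧ b = 254) := by omega
theorem pvR5 (a b c d ip : Int) (hip : ip = ((a * 256 + b) * 256 + c) * 256 + d)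
    (ha : 0 ≤ a ∧ a ≤ 255) (hb : 0 ≤ b ∧ b ≤ 255) (hc : 0 ≤ c ∧ c ≤ 255) (hd : 0 ≤ d ∧ d ≤ 255) :
    ((2886729728:Int) ≤ ip ∧ ip ≤ 2887778303) ↔ (a = 172 ∧ 16 ≤ b ∧ b ≤ 31) := by omega
theorem pvR6 (a b c d ip : Int) (hip : ip = ((a * 256 + b) * 256 + c) * 256 + d)
    (ha : 0 ≤ a ∧ a ≤ 255) (hb : 0 ≤ b ∧ b ≤ 255) (hc : 0 ≤ c ∧ c ≤ 255) (hd : 0 ≤ d ∧ d ≤ 255) :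
    ((3221225984:Int) ≤ ip ∧ ip ≤ 3221226239) ↔ (a = 192 ∧ b = 0 ∧ c = 2) := by omega
theorem pvR7 (a b c d ip : Int) (hip : ip = ((a * 256 + b) * 256 + c) * 256 + d)
    (ha : 0 ≤ a ∧ a ≤ 255) (hb : 0 ≤ b ∧ b ≤ 255) (hc : 0 ≤ c ∧ c ≤ 255) (hd : 0 ≤ d ∧ d ≤ 255) :
    ((3232235520:Int) ≤ ip ∧ ip ≤ 3232301055) ↔ (a = 192 ∧ b = 168) := by omega
theorem pvR8 (a b c d ip : Int) (hip : ip = ((a * 256 + b) * 256 + c) * 256 + d)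
    (ha : 0 ≤ a ∧ a ≤ 255) (hb : 0 ≤ b ∧ b ≤ 255) (hc : 0 ≤ c ∧ c ≤ 255) (hd : 0 ≤ d ∧ d ≤ 255) :
    ((3325256704:Int) ≤ ip ∧ ip ≤ 3325256959) ↔ (a = 198 ∧ b = 51 ∧ c = 100) := by omega
theorem pvR9 (a b c d ip : Int) (hip : ip = ((a * 256 + b) * 256 + c) * 256 + d)
    (ha : 0 ≤ a ∧ a ≤ 255) (hb : 0 ≤ b ∧ b ≤ 255) (hc : 0 ≤ c ∧ c ≤ 255) (hd : 0 ≤ d ∧ d ≤ 255) :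
    ((3405803776:Int) ≤ ip ∧ ip ≤ 3405804031) ↔ (a = 203 ∧ b = 0 ∧ c = 113) := by omega
theorem pvR10 (a b c d ip : Int) (hip : ip = ((a * 256 + b) * 256 + c) * 256 + d)
    (ha : 0 ≤ a ∧ a ≤ 255) (hb : 0 ≤ b ∧ b ≤ 255) (hc : 0 ≤ c ∧ c ≤ 255) (hd : 0 ≤ d ∧ d ≤ 255) :
    ((3758096384:Int) ≤ ip ∧ ip ≤ 4026531839) ↔ (224 ≤ a ∧ a ≤ 239) := by omega
theorem pvR11 (a b c d ip : Int) (hip : ip = ((a * 256 + b) * 256 + c) * 256 + d)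
    (ha : 0 ≤ a ∧ a ≤ 255) (hb : 0 ≤ b ∧ b ≤ 255) (hc : 0 ≤ c ∧ c ≤ 255) (hd : 0 ≤ d ∧ d ≤ 255) :
    ((4026531840:Int) ≤ ip ∧ ip ≤ 4294967295) ↔ 240 ≤ a := by omega

-- the core fact: on in-range octets the branch chain equals the range scan
set_option maxHeartbeats 1600000 in
theorem pvCore (a b c d ip : Int) (hip : ip = ((a * 256 + b) * 256 + c) * 256 + d)
    (ha : 0 ≤ a ∧ a ≤ 255) (hb : 0 ≤ b ∧ b ≤ 255)
    (hc : 0 ≤ c ∧ c ≤ 255) (hd : 0 ≤ d ∧ d ≤ 255) :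
    (if a = 0 then false
     else if a = 10 then false
     else if a = 127 then false
     else if a = 169 ∧ b = 254 then false
     else if a = 172 ∧ 16 ≤ b ∧ b ≤ 31 then false
     else if a = 192 ∧ b = 0 ∧ c = 2 then false
     else if a = 192 ∧ b = 168 then false
     else if a = 198 ∧ b = 51 ∧ c = 100 then false
     else if a = 203 ∧ b = 0 ∧ c = 113 then false
     else if 224 ≤ a ∧ a ≤ 239 then false
     else if 240 ≤ a then false
     else true) =
    (!(pvForbidden.any fun r => r.1 ≤ ip && ip ≤ r.2)) := by
  have hany : (pvForbidden.any fun r => r.1 ≤ ip && ip ≤ r.2) = true ↔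
      (a = 0 ∨ a = 10 ∨ a = 127 ∨ (a = 169 ∧ b = 254) ∨ (a = 172 ∧ 16 ≤ b ∧ b ≤ 31) ∨
       (a = 192 ∧ b = 0 ∧ c = 2) ∨ (a = 192 ∧ b = 168) ∨ (a = 198 ∧ b = 51 ∧ c = 100) ∨
       (a = 203 ∧ b = 0 ∧ c = 113) ∨ (224 ≤ a ∧ a ≤ 239) ∨ 240 ≤ a) := by
    simp only [pvForbidden, List.any_cons, List.any_nil, Bool.or_false, Bool.or_eq_true,
      Bool.and_eq_true, decide_eq_true_eq]
    rw [pvR1 a b c d ip hip ha hb hc hd, pvR2 a b c d ip hip ha hb hc hd,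
        pvR3 a b c d ip hip ha hb hc hd, pvR4 a b c d ip hip ha hb hc hd,
        pvR5 a b c d ip hip ha hb hc hd, pvR6 a b c d ip hip ha hb hc hd,
        pvR7 a b c d ip hip ha hb hc hd, pvR8 a b c d ip hip ha hb hc hd,
        pvR9 a b c d ip hip ha hb hc hd, pvR10 a b c d ip hip ha hb hc hd,
        pvR11 a b c d ip hip ha hb hc hd]
  cases hX : (pvForbidden.any fun r => r.1 ≤ ip && ip ≤ r.2) with
  | false =>
    have hnot : ¬ (a = 0 ∨ a = 10 ∨ a = 127 ∨ (a = 169 ∧ b = 254) ∨ (a = 172 ∧ 16 ≤ b ∧ b ≤ 31) ∨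
        (a = 192 ∧ b = 0 ∧ c = 2) ∨ (a = 192 ∧ b = 168) ∨ (a = 198 ∧ b = 51 ∧ c = 100) ∨
        (a = 203 ∧ b = 0 ∧ c = 113) ∨ (224 ≤ a ∧ a ≤ 239) ∨ 240 ≤ a) := by
      rw [← hany]; simp [hX]
    simp only [Bool.not_false]
    split_ifs with h1 h2 h3 h4 h5 h6 h7 h8 h9 h10 h11
    · exact absurd (Or.inl h1) hnot
    · exact absurd (Or.inr (Or.inl h2)) hnot
    · exact absurd (Or.inr (Or.inr (Or.inl h3))) hnot
    · exact absurd (Or.inr (Or.inr (Or.inr (Or.inl h4)))) hnot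
    · exact absurd (Or.inr (Or.inr (Or.inr (Or.inr (Or.inl h5))))) hnot
    · exact absurd (Or.inr (Or.inr (Or.inr (Or.inr (Or.inr (Or.inl h6)))))) hnot
    · exact absurd (Or.inr (Or.inr (Or.inr (Or.inr (Or.inr (Or.inr (Or.inl h7))))))) hnot
    · exact absurd (Or.inr (Or.inr (Or.inr (Or.inr (Or.inr (Or.inr (Or.inr (Or.inl h8)))))))) hnot
    · exact absurd (Or.inr (Or.inr (Or.inr (Or.inr (Or.inr (Or.inr (Or.inr (Or.inr (Or.inl h9))))))))) hnot
    · exact absurd (Or.inr (Or.inr (Or.inr (Or.inr (Or.inr (Or.inr (Or.inr (Or.inr (Or.inr (Or.inl h10)))))))))) hnot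
    · exact absurd (Or.inr (Or.inr (Or.inr (Or.inr (Or.inr (Or.inr (Or.inr (Or.inr (Or.inr (Or.inr h11)))))))))) hnot
    · rfl
  | true =>
    have hdisj := hany.mp hX
    simp only [Bool.not_true]
    split_ifs with h1 h2 h3 h4 h5 h6 h7 h8 h9 h10 h11
    · rfl
    · rfl
    · rfl
    · rfl
    · rfl
    · rfl
    · rfl
    · rfl
    · rfl
    · rfl
    · rfl
    · rcases hdisj with h | h | h | h | h | h | h | h | h | h | h
      · exact absurd h h1
      · exact absurd h h2
      · exact absurd h h3
      · exact absurd h h4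
      · exact absurd h h5
      · exact absurd h h6
      · exact absurd h h7
      · exact absurd h h8
      · exact absurd h h9
      · exact absurd h h10
      · exact absurd h h11

theorem ipv4_public_eq_alt (value : String) : ipv4_public value = ipv4_public_alt value := by
  unfold ipv4_public ipv4_public_alt
  by_cases hlen : (PySem.Chars.splitOn value.toList ['.']).length = 4
  · simp only [hlen]
    cases hmap : pvIntList (PySem.Chars.splitOn value.toList ['.']) with
    | none => simp
    | some octets =>
      have hol : octets.length = 4 := by
        rw [pvIntList_length _ octets hmap, hlen]
      match octets, hol with
      | [a, b, c, d], _ =>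
        by_cases hall : ([a, b, c, d].all fun o => decide (0 ≤ o) && decide (o ≤ 255)) = true
        · have hb := hall
          simp only [List.all_cons, List.all_nil, Bool.and_true, Bool.and_eq_true,
            decide_eq_true_eq] at hb
          obtain ⟨ha', hb', hc', hd'⟩ := hb
          simp only [ne_eq, hall, Bool.not_true, Bool.false_eq_true,
            if_true, if_false, List.foldl]
          exact pvCore a b c d _ (by ring) ha' hb' hc' hd'
        · simp only [Bool.not_eq_true] at hall
          simp [hall]
  · simp [hlen]

-- ===== VERDICT (by name: the statement is the Claim_ definition above) =====
theorem ipv4_public_spec : Claim_equal_ipv4_public := by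
  intro value _
  exact ipv4_public_eq_alt value
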